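-- pv_equiv track=rewrite | github.com/nhsx/hypergraphical | src/numpy_utils.py | N_max_hyperarcs
-- ===== SOURCE A (Python) =====
-- import math
--
-- def N_max_hyperarcs(n_diseases, b_hyp=True):
--     """
--     Compute the maximum possible number of hyperarcs
--
--     INPUTS:
--     ----------------
--         n_diseases (int) : Number of diseases (nodes) in the directed
--         hypergraph
--
--         b_hyp (bool) : Flag to only count the number of B-hyperarcs. If False,
--         will count B-, F- and BF-hyperarcs. Note, if set to True, this is
--         incidentally how many F-hyperarcs are possible due to the symmetry of
--         constructing the tail and head node sets.
--     """
--     # Initialise sum as number of nodes as to account for self-loops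
--     hyperarc_sum = n_diseases
--
--     # Loop over hyperedge degrees
--     for k in range(2, n_diseases + 1):
--         # Estimate n choose k
--         # comb = N_choose_k(n_diseases, k)
--         comb = math.comb(n_diseases, k)
--
--         # Count possible hyperarcs of hyperedge degree, depending on
--         # if we only count B-hyperarcs or not
--         if not b_hyp:
--             hyperarc_sum += (2**k - 2) * comb
--         else:
--             hyperarc_sum += k * comb
--
--     return int(hyperarc_sum)
-- ===== SOURCE B (Python) =====
-- def N_max_hyperarcs(n_diseases, b_hyp=True):
--     # Closed-form count (O(1) arithmetic instead of the k-loop):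
--     # sum_k k*C(n,k) = n*2^(n-1);  sum_k (2^k-2)*C(n,k) telescopes to 3^n - 2^(n+1) + 1.
--     if b_hyp:
--         return n_diseases * 2**n_diseases // 2
--     return 3**n_diseases - 2**(n_diseases + 1) + 1 + n_diseases
-- ===== Notes on version B (the rewrite author's own statement) =====
-- stated objective: faster
-- what changed: Replaced the k-loop summing k*C(n,k) (or (2^k-2)*C(n,k)) with the closed forms n*2^(n-1) and 3^n-2^(n+1)+1+n.
-- outside the precondition, e.g. on N_max_hyperarcs(-3, True): A returns -3, B returns -1.0; on N_max_hyperarcs(-3, False): A returns -3, B returns -2.212962962962963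
import Mathlib
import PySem

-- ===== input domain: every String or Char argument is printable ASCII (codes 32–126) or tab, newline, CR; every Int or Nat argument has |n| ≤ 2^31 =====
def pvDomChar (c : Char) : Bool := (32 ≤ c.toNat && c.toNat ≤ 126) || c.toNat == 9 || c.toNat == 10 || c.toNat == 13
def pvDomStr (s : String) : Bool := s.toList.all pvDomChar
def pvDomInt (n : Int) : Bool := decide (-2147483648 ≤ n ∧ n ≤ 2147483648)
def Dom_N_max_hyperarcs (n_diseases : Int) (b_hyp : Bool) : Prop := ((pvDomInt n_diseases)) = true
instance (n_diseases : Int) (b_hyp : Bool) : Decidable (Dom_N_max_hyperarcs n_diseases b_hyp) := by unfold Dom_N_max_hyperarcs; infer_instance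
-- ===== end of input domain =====

-- B replaces A's loop over hyperedge degrees by the closed forms n*2^(n-1) and
-- 3^n - 2^(n+1) + 1 + n (objective: faster, O(1) arithmetic ops instead of the loop).

-- ===== PORT A =====
-- port of the library call math.comb (binomial coefficient, computed efficiently)
def pyComb (n k : Nat) : Nat := n.descFactorial k / k.factorial

-- literal port of A: start at n_diseases, loop k over range(2, n+1), add
-- (2^k - 2)*comb or k*comb where comb = math.comb(n, k)
def N_max_hyperarcs (n_diseases : Int) (b_hyp : Bool) : Int :=
  (PySem.List.pyRange 2 (n_diseases + 1) 1).foldl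
    (fun s k =>
      let comb : Int := (pyComb n_diseases.toNat k.toNat : Nat)
      if !b_hyp then s + ((2 : Int) ^ k.toNat - 2) * comb
      else s + k * comb)
    n_diseases

-- ===== PORT B =====
def N_max_hyperarcs_alt (n_diseases : Int) (b_hyp : Bool) : Int :=
  if b_hyp then PySem.Int.floordiv (n_diseases * 2 ^ n_diseases.toNat) 2
  else 3 ^ n_diseases.toNat - 2 ^ (n_diseases + 1).toNat + 1 + n_diseases

-- ===== PRECONDITION & SPEC =====
-- Pre_ restricts to the natural domain of nonnegative node counts: for negative
-- n_diseases A's loop is empty and it accidentally returns n_diseases, while B's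
-- closed form is not an integer there (Python returns a float).
def Pre_N_max_hyperarcs (n_diseases : Int) (b_hyp : Bool) : Prop := 0 ≤ n_diseases
instance (n_diseases : Int) (b_hyp : Bool) : Decidable (Pre_N_max_hyperarcs n_diseases b_hyp) := by unfold Pre_N_max_hyperarcs; infer_instance
def pvWitness_N_max_hyperarcs : Int × Bool := (4, true)

def Spec_N_max_hyperarcs (n_diseases : Int) (b_hyp : Bool) (out : Int) : Prop := out = N_max_hyperarcs_alt n_diseases b_hyp
instance (n_diseases : Int) (b_hyp : Bool) (out : Int) : Decidable (Spec_N_max_hyperarcs n_diseases b_hyp out) := by unfold Spec_N_max_hyperarcs; infer_instance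

-- ===== CLAIM (what is proved, stated in full; the proofs are below) =====
def Claim_equal_N_max_hyperarcs : Prop := ∀ (n_diseases : Int) (b_hyp : Bool), Dom_N_max_hyperarcs n_diseases b_hyp → Pre_N_max_hyperarcs n_diseases b_hyp → Spec_N_max_hyperarcs n_diseases b_hyp (N_max_hyperarcs n_diseases b_hyp)

-- ===== LEMMAS AND PROOFS =====

lemma pv_list_sum (f : ℕ → ℤ) (n : ℕ) :
    ((List.range n).map f).sum = ∑ i ∈ Finset.range n, f i := by
  induction n with
  | zero => simp
  | succ k ih =>
      rw [List.range_succ, List.map_append, List.sum_append, Finset.sum_range_succ, ih]; simp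

-- the loop runs j = 0 .. p, hyperedge degree k = j + 2, with n = p + 2
lemma pv_sum_k_choose (p : ℕ) :
    ∑ j ∈ Finset.range (p + 1), (j + 2) * Nat.choose (p + 2) (j + 2) + (p + 2)
      = (p + 2) * 2 ^ (p + 1) := by
  have h := Nat.sum_range_mul_choose (p + 2)
  rw [show p + 2 + 1 = (p + 1) + 1 + 1 from rfl] at h
  rw [Finset.sum_range_succ' (fun i => i * Nat.choose (p + 2) i)] at h
  rw [Finset.sum_range_succ' (fun i => (i + 1) * Nat.choose (p + 2) (i + 1))] at h
  simp [Nat.choose_one_right] at h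
  omega

lemma pv_sum_choose (p : ℕ) :
    ∑ j ∈ Finset.range (p + 1), Nat.choose (p + 2) (j + 2) + (p + 3) = 2 ^ (p + 2) := by
  have h := Nat.sum_range_choose (p + 2)
  rw [show p + 2 + 1 = (p + 1) + 1 + 1 from rfl] at h
  rw [Finset.sum_range_succ' (fun i => Nat.choose (p + 2) i)] at h
  rw [Finset.sum_range_succ' (fun i => Nat.choose (p + 2) (i + 1))] at h
  simp [Nat.choose_one_right] at h
  omega

lemma pv_sum_pow_choose (p : ℕ) :
    ∑ j ∈ Finset.range (p + 1), 2 ^ (j + 2) * Nat.choose (p + 2) (j + 2) + (2 * p + 5)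
      = 3 ^ (p + 2) := by
  have h : ∑ i ∈ Finset.range (p + 2 + 1), 2 ^ i * Nat.choose (p + 2) i = 3 ^ (p + 2) := by
    have := add_pow (2 : ℕ) 1 (p + 2)
    simpa using this.symm
  rw [show p + 2 + 1 = (p + 1) + 1 + 1 from rfl] at h
  rw [Finset.sum_range_succ' (fun i => 2 ^ i * Nat.choose (p + 2) i)] at h
  rw [Finset.sum_range_succ' (fun i => 2 ^ (i + 1) * Nat.choose (p + 2) (i + 1))] at h
  simp [Nat.choose_one_right] at h
  omega

lemma pyComb_eq_choose (n k : Nat) : pyComb n k = Nat.choose n k :=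
  (Nat.choose_eq_descFactorial_div_factorial n k).symm

-- ===== VERDICT (by name: the statement is the Claim_ definition above) =====
theorem N_max_hyperarcs_spec : Claim_equal_N_max_hyperarcs := by
  intro n b _ hpre
  unfold Spec_N_max_hyperarcs N_max_hyperarcs N_max_hyperarcs_alt
  simp only [pyComb_eq_choose]
  unfold Pre_N_max_hyperarcs at hpre
  obtain ⟨m, rfl⟩ := Int.eq_ofNat_of_zero_le hpre
  by_cases hm : m < 2
  · rcases m with _ | _ | m
    · rw [PySem.List.pyRange_one_eq_nil (by norm_num)]
      cases b <;> simp [PySem.Int.floordiv] <;> norm_num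
    · rw [PySem.List.pyRange_one_eq_nil (by norm_num)]
      cases b <;> simp [PySem.Int.floordiv] <;> norm_num
    · omega
  obtain ⟨p, rfl⟩ : ∃ p, m = p + 2 := ⟨m - 2, by omega⟩
  have hrange : PySem.List.pyRange 2 ((((p + 2 : ℕ) : ℤ)) + 1) 1
      = (List.range (p + 1)).map (fun j : ℕ => (2 : ℤ) + j) := by
    rw [PySem.List.pyRange_one,
      show ((((p + 2 : ℕ) : ℤ)) + 1 - 2).toNat = p + 1 from by omega]
  have hto : ∀ j : ℕ, ((2 : ℤ) + j).toNat = j + 2 := fun j => by omega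
  have hmn : (((p + 2 : ℕ) : ℤ)).toNat = p + 2 := by omega
  have hmn1 : ((((p + 2 : ℕ) : ℤ)) + 1).toNat = p + 3 := by omega
  cases b
  · -- b_hyp = False: hyperarc_sum += (2**k - 2) * comb
    simp only [hrange, List.foldl_map, hmn, hmn1, Bool.not_false, Bool.not_true,
      Bool.false_eq_true, ite_true, ite_false, if_true, if_false, reduceIte]
    rw [PySem.List.foldl_add]
    simp only [hto]
    rw [pv_list_sum]
    have hA := pv_sum_pow_choose p
    have hB := pv_sum_choose p
    have hsplit : ∑ j ∈ Finset.range (p + 1),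
        ((2 : ℤ) ^ (j + 2) - 2) * (Nat.choose (p + 2) (j + 2) : ℕ)
        = ((∑ j ∈ Finset.range (p + 1), 2 ^ (j + 2) * Nat.choose (p + 2) (j + 2) : ℕ) : ℤ)
          - 2 * ((∑ j ∈ Finset.range (p + 1), Nat.choose (p + 2) (j + 2) : ℕ) : ℤ) := by
      push_cast
      rw [Finset.mul_sum, ← Finset.sum_sub_distrib]
      exact Finset.sum_congr rfl fun j _ => by ring
    rw [hsplit]
    have hA' : ((∑ j ∈ Finset.range (p + 1), 2 ^ (j + 2) * Nat.choose (p + 2) (j + 2) : ℕ) : ℤ)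
        = 3 ^ (p + 2) - (2 * p + 5) := by
      have := congrArg (Nat.cast : ℕ → ℤ) hA; push_cast at this ⊢; linarith
    have hB' : ((∑ j ∈ Finset.range (p + 1), Nat.choose (p + 2) (j + 2) : ℕ) : ℤ)
        = 2 ^ (p + 2) - (p + 3) := by
      have := congrArg (Nat.cast : ℕ → ℤ) hB; push_cast at this ⊢; linarith
    rw [hA', hB']
    have hp3 : (2 : ℤ) ^ (p + 3) = 2 * 2 ^ (p + 2) := by ring
    push_cast
    rw [hp3]
    ring
  · -- b_hyp = True: hyperarc_sum += k * comb
    simp only [hrange, List.foldl_map, hmn, hmn1, Bool.not_false, Bool.not_true,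
      Bool.false_eq_true, ite_true, ite_false, if_true, if_false, reduceIte]
    rw [PySem.List.foldl_add]
    simp only [hto]
    rw [pv_list_sum]
    have key := pv_sum_k_choose p
    have hS : ∑ j ∈ Finset.range (p + 1), ((2 : ℤ) + j) * (Nat.choose (p + 2) (j + 2) : ℕ)
        = ((∑ j ∈ Finset.range (p + 1), (j + 2) * Nat.choose (p + 2) (j + 2) : ℕ) : ℤ) := by
      push_cast
      exact Finset.sum_congr rfl fun j _ => by ring
    rw [hS]
    rw [PySem.Int.floordiv_eq_ediv_of_pos (by norm_num)]
    have hfd : (((p + 2 : ℕ) : ℤ) * 2 ^ (p + 2)) / 2 = (((p + 2) * 2 ^ (p + 1) : ℕ) : ℤ) := by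
      have hcast : (((p + 2 : ℕ) : ℤ) * 2 ^ (p + 2)) = (((p + 2) * 2 ^ (p + 2) : ℕ) : ℤ) := by
        push_cast; ring
      rw [hcast, show ((p + 2) * 2 ^ (p + 2) : ℕ) = ((p + 2) * 2 ^ (p + 1)) * 2 from by ring]
      push_cast
      exact Int.mul_ediv_cancel _ (by norm_num)
    rw [hfd]
    have := congrArg (Nat.cast : ℕ → ℤ) key
    push_cast at this ⊢
    linarith
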